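-- pv_equiv track=rewrite | github.com/Zeniuus/Cracking-the-Coding-Interview | 2018/10/03/16.17.연속수열/main.py | _compress_same_sign
-- ===== SOURCE A (Python) =====
-- from collections import namedtuple
--
-- CompSeqItem = namedtuple('CompSeqItem', ('subseq', 'val'))
--
-- def _compress_same_sign(seq):
--     is_positive_subseq = None
--     curr_subseq = []
--     compressed_seq = []
--     for elem in seq:
--         if not curr_subseq:
--             # First iteration
--             curr_subseq.append(elem)
--             is_positive_subseq = (elem >= 0)
--         else:
--             if is_positive_subseq == (elem >= 0):
--                 curr_subseq.append(elem)
--             else: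
--                 compressed_seq.append(CompSeqItem(curr_subseq, sum(curr_subseq)))
--                 curr_subseq = [elem]
--                 is_positive_subseq = (elem >= 0)
--     if curr_subseq:
--         compressed_seq.append(CompSeqItem(curr_subseq, sum(curr_subseq)))
--     return compressed_seq
-- ===== SOURCE B (Python) =====
-- from collections import namedtuple
--
-- CompSeqItem = namedtuple('CompSeqItem', ('subseq', 'val'))
--
-- def _compress_same_sign(seq):
--     if not seq:
--         return []
--     # Pass 1: boundary indices where the sign (x >= 0) changes between neighbours.
--     bounds = [0]
--     for i, (x, y) in enumerate(zip(seq, seq[1:])):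
--         if (x >= 0) != (y >= 0):
--             bounds.append(i + 1)
--     bounds.append(len(seq))
--     # Pass 2: slice seq into runs and sum each slice.
--     return [CompSeqItem(seq[a:b], sum(seq[a:b])) for a, b in zip(bounds, bounds[1:])]
-- ===== Notes on version B (the rewrite author's own statement) =====
-- stated objective: alternative
-- what changed: Replaces A's one-pass flush-on-sign-change state machine with two staged passes: first collect the indices where the sign changes (via zip of seq with its tail), then slice seq at those boundaries and sum each slice.
import Mathlib
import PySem

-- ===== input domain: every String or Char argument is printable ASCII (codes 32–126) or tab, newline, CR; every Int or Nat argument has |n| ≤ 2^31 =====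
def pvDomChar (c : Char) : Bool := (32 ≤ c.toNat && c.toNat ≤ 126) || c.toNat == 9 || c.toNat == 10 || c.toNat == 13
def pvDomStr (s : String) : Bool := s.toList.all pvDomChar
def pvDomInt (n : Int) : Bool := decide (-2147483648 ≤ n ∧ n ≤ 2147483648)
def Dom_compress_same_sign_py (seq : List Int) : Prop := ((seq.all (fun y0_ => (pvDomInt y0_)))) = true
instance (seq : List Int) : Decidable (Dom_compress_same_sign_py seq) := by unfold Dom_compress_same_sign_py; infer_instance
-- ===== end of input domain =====

-- B replaces A's one-pass flush-on-sign-change state machine with two staged passes: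
-- first collect the sign-change boundary indices, then slice seq at those boundaries
-- and sum each slice (alternative decomposition, same cost).

-- ===== PORT A =====
-- state = (is_positive_subseq, curr_subseq, compressed_seq), exactly A's loop body
def compAStep (st : Option Bool × List Int × List (List Int × Int)) (elem : Int) :
    Option Bool × List Int × List (List Int × Int) :=
  let (isPos, curr, out) := st
  if curr = [] then
    (some (decide (0 ≤ elem)), curr ++ [elem], out)
  else if isPos = some (decide (0 ≤ elem)) then
    (isPos, curr ++ [elem], out)
  else
    (some (decide (0 ≤ elem)), [elem], out ++ [(curr, curr.sum)])

def compress_same_sign_py (seq : List Int) : List (List Int × Int) :=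
  let st := seq.foldl compAStep (none, [], [])
  let curr := st.2.1
  let out := st.2.2
  if curr ≠ [] then out ++ [(curr, curr.sum)] else out

-- ===== PORT B =====
-- pass 1: bounds = [0] + [i+1 for i,(x,y) in enumerate(zip(seq, seq[1:])) if sign change] + [len(seq)]
-- pass 2: [(seq[a:b], sum(seq[a:b])) for a,b in zip(bounds, bounds[1:])]
def compress_same_sign_py_alt (seq : List Int) : List (List Int × Int) :=
  if seq = [] then []
  else
    let bounds0 := (PySem.List.enumerate (seq.zip seq.tail)).foldl
        (fun acc p => if decide (0 ≤ p.2.1) != decide (0 ≤ p.2.2) then acc ++ [p.1 + 1] else acc)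
        [(0 : Int)]
    let bounds := bounds0 ++ [(seq.length : Int)]
    (bounds.zip bounds.tail).map (fun ab =>
      let s := PySem.List.slice seq (some ab.1) (some ab.2)
      (s, s.sum))

-- ===== PRECONDITION & SPEC =====
def Spec_compress_same_sign_py (seq : List Int) (out : List (List Int × Int)) : Prop := out = compress_same_sign_py_alt seq
instance (seq : List Int) (out : List (List Int × Int)) : Decidable (Spec_compress_same_sign_py seq out) := by unfold Spec_compress_same_sign_py; infer_instance

-- ===== CLAIM (what is proved, stated in full; the proofs are below) =====
def Claim_equal_compress_same_sign_py : Prop := ∀ (seq : List Int), Dom_compress_same_sign_py seq → Spec_compress_same_sign_py seq (compress_same_sign_py seq)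

-- ===== LEMMAS AND PROOFS =====

-- the common reference value: split seq into maximal same-sign runs, recursively
def takeRunB (b : Bool) : List Int → List Int × List Int
  | [] => ([], [])
  | x :: xs =>
    if decide (0 ≤ x) = b then
      let (r, rest) := takeRunB b xs
      (x :: r, rest)
    else ([], x :: xs)

theorem takeRunB_rest_len (b : Bool) : ∀ xs : List Int, (takeRunB b xs).2.length ≤ xs.length := by
  intro xs
  induction xs with
  | nil => simp [takeRunB]
  | cons x xs ih =>
    simp only [takeRunB]
    split
    · simpa using Nat.le_succ_of_le ih
    · simp

def runSplit : List Int → List (List Int × Int)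
  | [] => []
  | x :: xs =>
    let b := decide (0 ≤ x)
    let p := takeRunB b xs
    let items := x :: p.1
    (items, items.sum) :: runSplit p.2
termination_by xs => xs.length
decreasing_by
  simpa using Nat.lt_succ_of_le (takeRunB_rest_len (decide (0 ≤ x)) xs)

theorem runSplit_nil : runSplit [] = [] := by rw [runSplit]

theorem runSplit_cons (x : Int) (xs : List Int) :
    runSplit (x :: xs) =
      (x :: (takeRunB (decide (0 ≤ x)) xs).1, (x :: (takeRunB (decide (0 ≤ x)) xs).1).sum)
        :: runSplit (takeRunB (decide (0 ≤ x)) xs).2 := by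
  rw [runSplit]

theorem takeRunB_append (b : Bool) : ∀ xs : List Int, (takeRunB b xs).1 ++ (takeRunB b xs).2 = xs := by
  intro xs
  induction xs with
  | nil => simp [takeRunB]
  | cons x xs ih =>
    simp only [takeRunB]
    split
    · simpa using ih
    · simp

theorem takeRunB_all (b : Bool) : ∀ xs : List Int, ∀ z ∈ (takeRunB b xs).1, decide (0 ≤ z) = b := by
  intro xs
  induction xs with
  | nil => simp [takeRunB]
  | cons x xs ih =>
    simp only [takeRunB]
    split
    · rename_i h
      intro z hz
      simp only [List.mem_cons] at hz
      rcases hz with rfl | hz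
      · exact h
      · exact ih z hz
    · simp

theorem takeRunB_head (b : Bool) : ∀ (xs : List Int) (y : Int) (t : List Int),
    (takeRunB b xs).2 = y :: t → decide (0 ≤ y) ≠ b := by
  intro xs
  induction xs with
  | nil => simp [takeRunB]
  | cons x xs ih =>
    simp only [takeRunB]
    split
    · exact fun y t h => ih y t h
    · rename_i h
      intro y t he
      simp only [List.cons.injEq] at he
      rw [he.1] at h
      exact h

-- ----- A equals runSplit -----
def finishA (st : Option Bool × List Int × List (List Int × Int)) : List (List Int × Int) :=
  if st.2.1 ≠ [] then st.2.2 ++ [(st.2.1, st.2.1.sum)] else st.2.2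

theorem loop_invariant (xs : List Int) : ∀ (b : Bool) (curr : List Int) (out : List (List Int × Int)),
    curr ≠ [] →
    finishA (xs.foldl compAStep (some b, curr, out)) =
      out ++ ((curr ++ (takeRunB b xs).1, (curr ++ (takeRunB b xs).1).sum)
               :: runSplit (takeRunB b xs).2) := by
  induction xs with
  | nil =>
    intro b curr out h
    simp [takeRunB, finishA, runSplit_nil, h]
  | cons x xs ih =>
    intro b curr out h
    by_cases hx : decide (0 ≤ x) = b
    · have step : compAStep (some b, curr, out) x = (some b, curr ++ [x], out) := by
        simp [compAStep, h, hx]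
      rw [List.foldl_cons, step, ih b (curr ++ [x]) out (by simp)]
      simp [takeRunB, hx]
    · have step : compAStep (some b, curr, out) x =
          (some (decide (0 ≤ x)), [x], out ++ [(curr, curr.sum)]) := by
        simp only [compAStep]
        rw [if_neg h, if_neg (by simpa using fun e => hx e.symm)]
      rw [List.foldl_cons, step, ih (decide (0 ≤ x)) [x] _ (by simp)]
      simp [takeRunB, hx, runSplit_cons]

theorem A_eq_runSplit (seq : List Int) : compress_same_sign_py seq = runSplit seq := by
  unfold compress_same_sign_py
  cases seq with
  | nil => simp [runSplit_nil]
  | cons x xs =>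
    have step : compAStep (none, [], []) x = (some (decide (0 ≤ x)), [x], []) := by
      simp [compAStep]
    have := loop_invariant xs (decide (0 ≤ x)) [x] [] (by simp)
    simp only [List.foldl_cons, step] at *
    show finishA _ = _
    rw [this]
    simp [runSplit_cons]

-- ----- B equals runSplit -----
-- the boundary indices of sign changes, head of list carrying global index i
def cutsFrom (i : Int) : List Int → List Int
  | x :: y :: t => (if decide (0 ≤ x) != decide (0 ≤ y) then [i + 1] else []) ++ cutsFrom (i + 1) (y :: t)
  | _ => []

theorem cutsFrom_nil (i : Int) : cutsFrom i [] = [] := rfl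
theorem cutsFrom_single (i : Int) (x : Int) : cutsFrom i [x] = [] := rfl

theorem cuts_eq : ∀ (l : List Int) (i : Int),
    ((PySem.List.enumerate (l.zip l.tail) i).filter
        (fun p => decide (0 ≤ p.2.1) != decide (0 ≤ p.2.2))).map (fun p => p.1 + 1)
      = cutsFrom i l := by
  intro l
  induction l with
  | nil => intro i; rfl
  | cons x xs ih =>
    intro i
    cases xs with
    | nil => rfl
    | cons y t =>
      simp only [List.tail_cons, List.zip_cons_cons, PySem.List.enumerate_cons]
      rw [List.filter_cons]
      by_cases hc : (decide (0 ≤ x) != decide (0 ≤ y)) = true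
      · simp only [hc, if_pos]
        rw [List.map_cons]
        have := ih (i + 1)
        simp only [List.tail_cons] at this
        rw [this]
        simp [cutsFrom, hc]
      · simp only [hc]
        have := ih (i + 1)
        simp only [List.tail_cons] at this
        rw [if_neg (by simpa using hc), this]
        simp only [cutsFrom]
        rw [if_neg (by simpa using hc)]
        simp

theorem cutsFrom_shift : ∀ (l : List Int) (i : Int),
    cutsFrom i l = (cutsFrom 0 l).map (· + i) := by
  intro l
  induction l with
  | nil => intro i; rfl
  | cons x xs ih =>
    intro i
    cases xs with
    | nil => rfl
    | cons y t =>
      simp only [cutsFrom]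
      rw [ih (i + 1), ih (0 + 1), List.map_append, List.map_map]
      congr 1
      · split <;> simp [add_comm]
      · apply List.map_congr_left
        intro a _
        simp
        omega

theorem cutsFrom_nonneg : ∀ (l : List Int) (i : Int), 0 ≤ i → ∀ e ∈ cutsFrom i l, 0 ≤ e := by
  intro l
  induction l with
  | nil => intro i _ e he; simp [cutsFrom_nil] at he
  | cons x xs ih =>
    intro i hi e he
    cases xs with
    | nil => simp [cutsFrom_single] at he
    | cons y t =>
      simp only [cutsFrom, List.mem_append] at he
      rcases he with he | he
      · split at he <;> simp at he
        omega
      · exact ih (i + 1) (by omega) e he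

theorem cutsFrom_run : ∀ (run : List Int) (r2 : List Int) (i : Int) (b : Bool),
    run ≠ [] → (∀ z ∈ run, decide (0 ≤ z) = b) →
    (∀ y t, r2 = y :: t → decide (0 ≤ y) ≠ b) →
    cutsFrom i (run ++ r2) =
      if r2 = [] then [] else (i + run.length) :: cutsFrom (i + run.length) r2 := by
  intro run
  induction run with
  | nil => intro r2 i b h; exact absurd rfl h
  | cons u run' ih =>
    intro r2 i b _ hall hhead
    cases run' with
    | nil =>
      cases r2 with
      | nil => simp [cutsFrom_single]
      | cons y t =>
        have hu : decide (0 ≤ u) = b := hall u (by simp)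
        have hy : decide (0 ≤ y) ≠ b := hhead y t rfl
        simp only [List.singleton_append, cutsFrom]
        rw [if_pos (by simp [hu]; exact fun e => hy e.symm)]
        simp only [List.length_cons, List.length_nil]
        rw [cutsFrom_shift (y :: t) (i + 1)]
        rw [cutsFrom_shift (y :: t) (i + (0 + 1 : Nat))]
        simp
    | cons v run'' =>
      have hu : decide (0 ≤ u) = b := hall u (by simp)
      have hv : decide (0 ≤ v) = b := hall v (by simp)
      have : cutsFrom i ((u :: v :: run'') ++ r2) = cutsFrom (i + 1) ((v :: run'') ++ r2) := by
        simp only [List.cons_append, cutsFrom]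
        rw [if_neg (by simp [hu, hv])]
        simp
      rw [this, ih r2 (i + 1) b (by simp) (fun z hz => hall z (by simp [hz])) hhead]
      split
      · rfl
      · have he : i + 1 + (((v :: run'').length : Nat) : Int) = i + (((u :: v :: run'').length : Nat) : Int) := by
          simp only [List.length_cons]; push_cast; ring
        rw [he]

-- the slices pass, as a function of the bounds list
def sliceMap (l : List Int) (bs : List Int) : List (List Int × Int) :=
  (bs.zip bs.tail).map (fun ab =>
    let s := PySem.List.slice l (some ab.1) (some ab.2)
    (s, s.sum))

def boundsOf (l : List Int) : List Int := (0 :: cutsFrom 0 l) ++ [(l.length : Int)]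

theorem B_eq_sliceMap (seq : List Int) (h : seq ≠ []) :
    compress_same_sign_py_alt seq = sliceMap seq (boundsOf seq) := by
  unfold compress_same_sign_py_alt sliceMap boundsOf
  rw [if_neg h]
  dsimp only
  have hfold := PySem.List.foldl_append_if
      (fun p : Int × Int × Int => decide (0 ≤ p.2.1) != decide (0 ≤ p.2.2))
      (fun p : Int × Int × Int => p.1 + 1)
      (PySem.List.enumerate (seq.zip seq.tail)) [(0 : Int)]
  rw [hfold, cuts_eq seq 0]
  rfl

theorem boundsOf_nonneg (l : List Int) : ∀ e ∈ boundsOf l, 0 ≤ e := by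
  intro e he
  simp only [boundsOf, List.cons_append, List.mem_cons, List.mem_append,
    List.not_mem_nil, or_false] at he
  rcases he with rfl | he | rfl
  · rfl
  · exact cutsFrom_nonneg l 0 le_rfl e he
  · positivity

theorem slice_append_shift (pre l : List Int) (a b : Int) (ha : 0 ≤ a) (hb : 0 ≤ b) :
    PySem.List.slice (pre ++ l) (some (a + pre.length)) (some (b + pre.length))
      = PySem.List.slice l (some a) (some b) := by
  rw [PySem.List.slice_toNat (pre ++ l) (by positivity) (by positivity),
      PySem.List.slice_toNat l ha hb]
  have h1 : (a + (pre.length : Int)).toNat = a.toNat + pre.length := by omega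
  have h2 : (b + (pre.length : Int)).toNat = b.toNat + pre.length := by omega
  rw [h1, h2]
  have h3 : a.toNat + pre.length = pre.length + a.toNat := by omega
  rw [h3, List.drop_length_add_append]
  congr 1
  omega

theorem slice_full (l : List Int) : PySem.List.slice l (some 0) (some (l.length : Int)) = l := by
  rw [PySem.List.slice_toNat l le_rfl (by positivity)]
  simp

theorem sliceMap_shift (pre l : List Int) (bs : List Int) (hnn : ∀ e ∈ bs, 0 ≤ e) :
    sliceMap (pre ++ l) (bs.map (· + (pre.length : Int))) = sliceMap l bs := by
  unfold sliceMap
  rw [← List.map_tail, List.zip_map, List.map_map]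
  apply List.map_congr_left
  intro ab hab
  have h1 : ab.1 ∈ bs := (List.of_mem_zip hab).1
  have h2 : ab.2 ∈ bs := List.mem_of_mem_tail (List.of_mem_zip hab).2
  simp only [Function.comp, Prod.map]
  rw [slice_append_shift pre l ab.1 ab.2 (hnn _ h1) (hnn _ h2)]

theorem sliceMap_cons_cons (seq : List Int) (m0 : Int) (M : List Int) :
    sliceMap seq (0 :: m0 :: M) =
      (PySem.List.slice seq (some 0) (some m0),
        (PySem.List.slice seq (some 0) (some m0)).sum) :: sliceMap seq (m0 :: M) := by
  unfold sliceMap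
  simp

theorem B_eq_runSplit_aux : ∀ (n : Nat) (l : List Int), l.length ≤ n →
    compress_same_sign_py_alt l = runSplit l := by
  intro n
  induction n with
  | zero =>
    intro l hl
    have : l = [] := List.eq_nil_of_length_eq_zero (Nat.le_zero.mp hl)
    subst this
    simp [compress_same_sign_py_alt, runSplit_nil]
  | succ n ih =>
    intro l hl
    cases l with
    | nil => simp [compress_same_sign_py_alt, runSplit_nil]
    | cons x xs =>
      set b := decide (0 ≤ x) with hb
      have hsplit : (takeRunB b xs).1 ++ (takeRunB b xs).2 = xs := takeRunB_append b xs
      set r1 := (takeRunB b xs).1 with hr1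
      set r2 := (takeRunB b xs).2 with hr2
      have hseq : x :: xs = (x :: r1) ++ r2 := by simp [← hsplit]
      have hallrun : ∀ z ∈ x :: r1, decide (0 ≤ z) = b := by
        intro z hz
        rcases List.mem_cons.mp hz with rfl | hz
        · rfl
        · exact takeRunB_all b xs z hz
      have hhead : ∀ y t, r2 = y :: t → decide (0 ≤ y) ≠ b := fun y t h =>
        takeRunB_head b xs y t h
      have hcuts : cutsFrom 0 ((x :: r1) ++ r2) =
          if r2 = [] then [] else
            (0 + ((x :: r1).length : Int)) :: cutsFrom (0 + ((x :: r1).length : Int)) r2 :=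
        cutsFrom_run (x :: r1) r2 0 b (by simp) hallrun hhead
      have hlenseq : (x :: xs).length = (x :: r1).length + r2.length := by
        rw [hseq, List.length_append]
      rw [B_eq_sliceMap _ (by simp)]
      rw [runSplit_cons, ← hb, ← hr1, ← hr2]
      cases hr2e : r2 with
      | nil =>
        have hx : xs = r1 := by rw [← hsplit, hr2e]; simp
        have hbounds : boundsOf (x :: xs) = [0, ((x :: xs).length : Int)] := by
          unfold boundsOf
          rw [hseq, hcuts, if_pos hr2e]
          simp
        rw [hbounds]
        unfold sliceMap
        simp only [List.zip_cons_cons, List.tail_cons, List.zip_nil_right, List.map_cons,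
          List.map_nil]
        rw [slice_full]
        rw [runSplit_nil, hx]
      | cons y t =>
        rw [← hr2e]
        have hr2ne : r2 ≠ [] := by rw [hr2e]; simp
        have hlen2 : r2.length ≤ n := by
          have h1 : r2.length ≤ xs.length := hr2 ▸ takeRunB_rest_len b xs
          have h2 : xs.length ≤ n := by simpa using hl
          omega
        have hB2 : boundsOf r2 = 0 :: (cutsFrom 0 r2 ++ [(r2.length : Int)]) := by
          unfold boundsOf; simp
        have hbounds : boundsOf (x :: xs) =
            0 :: (boundsOf r2).map (· + ((x :: r1).length : Int)) := by
          unfold boundsOf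
          rw [hseq, hcuts, if_neg hr2ne]
          rw [cutsFrom_shift r2 (0 + ((x :: r1).length : Int))]
          have hmap : List.map (fun a => a + (0 + ((x :: r1).length : Int))) (cutsFrom 0 r2)
              = List.map (fun a => a + ((x :: r1).length : Int)) (cutsFrom 0 r2) :=
            List.map_congr_left (fun a _ => by ring_nf)
          have hlen : (((x :: r1 ++ r2).length : Nat) : Int)
              = ((r2.length : Nat) : Int) + ((x :: r1).length : Int) := by
            simp only [List.length_cons, List.length_append]
            push_cast
            ring
          rw [hmap, hlen]
          simp
        have hMcons : (boundsOf r2).map (· + ((x :: r1).length : Int)) =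
            (0 + ((x :: r1).length : Int)) ::
              ((cutsFrom 0 r2 ++ [(r2.length : Int)]).map (· + ((x :: r1).length : Int))) := by
          rw [hB2, List.map_cons]
        have hfirst : PySem.List.slice (x :: xs) (some 0)
            (some (0 + ((x :: r1).length : Int))) = x :: r1 := by
          rw [hseq, PySem.List.slice_toNat _ le_rfl (by omega)]
          have h0 : (0 + ((x :: r1).length : Int)).toNat = (x :: r1).length := by omega
          rw [h0]
          simp [List.take_left']
        rw [hbounds, hMcons, sliceMap_cons_cons, hfirst, ← hMcons]
        congr 1
        rw [hseq, sliceMap_shift (x :: r1) r2 (boundsOf r2) (boundsOf_nonneg r2)]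
        rw [← B_eq_sliceMap r2 hr2ne, ih r2 hlen2]

theorem B_eq_runSplit (l : List Int) : compress_same_sign_py_alt l = runSplit l :=
  B_eq_runSplit_aux l.length l le_rfl

-- ===== VERDICT (by name: the statement is the Claim_ definition above) =====
theorem compress_same_sign_py_spec : Claim_equal_compress_same_sign_py := by
  intro seq _
  unfold Spec_compress_same_sign_py
  rw [A_eq_runSplit, B_eq_runSplit]
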